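-- pv_equiv track=rewrite | github.com/p-koenig/bwinfCodeNew | Aufgabe3_Gluecksspiel/mainAufgabe3_Gluecksspiel.py | unterteileninfelder
-- ===== SOURCE A (Python) =====
-- def unterteileninfelder(zahlenimport):
--     outputfelder = []
--     puffer = []
--     for feldindex in range(0, 10):
--         for zahlenindex in range(feldindex*zahlenimport[-1]//10,
--                                  feldindex*zahlenimport[-1]//10 +
--                                  zahlenimport[-1]//10+2, 1):
--             for zahl in zahlenimport:
--                 if zahl == zahlenindex:
--                     puffer.append(zahl)
--         outputfelder.append(puffer)
--         puffer = []
--     return outputfelder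
-- ===== SOURCE B (Python) =====
-- def unterteileninfelder(zahlenimport):
--     # Filter each field's value range directly and sort, instead of scanning
--     # the whole input once per integer value in the range.
--     last = zahlenimport[-1]
--     width = last // 10 + 2
--     felder = []
--     for feldindex in range(10):
--         lo = feldindex * last // 10
--         felder.append(sorted(z for z in zahlenimport if lo <= z < lo + width))
--     return felder
-- ===== Notes on version B (the rewrite author's own statement) =====
-- stated objective: faster
-- what changed: Instead of scanning the whole input once for every integer value in each field's range (cost grows with the magnitude of the last element), B filters each of the 10 fields' value range in one pass and stably sorts the matches.
import Mathlib
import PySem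

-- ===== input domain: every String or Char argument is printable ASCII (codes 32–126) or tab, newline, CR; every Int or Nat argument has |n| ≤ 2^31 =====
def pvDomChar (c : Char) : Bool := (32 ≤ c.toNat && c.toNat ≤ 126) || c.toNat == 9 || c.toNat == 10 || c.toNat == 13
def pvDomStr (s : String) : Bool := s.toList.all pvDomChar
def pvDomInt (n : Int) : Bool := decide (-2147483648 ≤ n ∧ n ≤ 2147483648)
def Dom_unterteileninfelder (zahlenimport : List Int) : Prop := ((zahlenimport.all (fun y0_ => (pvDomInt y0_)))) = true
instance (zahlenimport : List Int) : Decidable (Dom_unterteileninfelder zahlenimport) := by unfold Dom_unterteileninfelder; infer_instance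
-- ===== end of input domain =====

-- ===== PORT A =====
-- B sorts each field's range-filtered numbers instead of scanning the whole input
-- once per integer value of the field's range (objective: faster).
-- zahlenimport[-1]: 'none' = IndexError on empty input, excluded by Pre_; .getD 0 is unreachable there.
def unterteileninfelder (zahlenimport : List Int) : List (List Int) :=
  let last := (PySem.List.pyGet? zahlenimport (-1)).getD 0
  (PySem.List.pyRange 0 10 1).foldl (fun outputfelder feldindex =>
    let puffer := (PySem.List.pyRange (PySem.Int.floordiv (feldindex * last) 10)
        (PySem.Int.floordiv (feldindex * last) 10 + PySem.Int.floordiv last 10 + 2) 1).foldl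
      (fun puffer zahlenindex =>
        zahlenimport.foldl (fun p zahl => if zahl = zahlenindex then p ++ [zahl] else p) puffer)
      []
    outputfelder ++ [puffer]) []

-- ===== PORT B =====
def unterteileninfelder_alt (zahlenimport : List Int) : List (List Int) :=
  let last := (PySem.List.pyGet? zahlenimport (-1)).getD 0
  let width := PySem.Int.floordiv last 10 + 2
  (PySem.List.pyRange 0 10 1).foldl (fun felder feldindex =>
    let lo := PySem.Int.floordiv (feldindex * last) 10
    felder ++ [PySem.List.sorted
      (zahlenimport.filter (fun z => decide (lo ≤ z ∧ z < lo + width))) (fun x => x) false]) []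

-- ===== PRECONDITION & SPEC =====
-- A evaluates zahlenimport[-1]; on the empty list Python raises IndexError, so it is excluded.
def Pre_unterteileninfelder (zahlenimport : List Int) : Prop := zahlenimport.length ≠ 0
instance (zahlenimport : List Int) : Decidable (Pre_unterteileninfelder zahlenimport) := by
  unfold Pre_unterteileninfelder; infer_instance
def pvWitness_unterteileninfelder : List Int := [3, 7, 10]

def Spec_unterteileninfelder (zahlenimport : List Int) (out : List (List Int)) : Prop := out = unterteileninfelder_alt zahlenimport
instance (zahlenimport : List Int) (out : List (List Int)) : Decidable (Spec_unterteileninfelder zahlenimport out) := by unfold Spec_unterteileninfelder; infer_instance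

-- ===== CLAIM (what is proved, stated in full; the proofs are below) =====
def Claim_equal_unterteileninfelder : Prop := ∀ (zahlenimport : List Int), Dom_unterteileninfelder zahlenimport → Pre_unterteileninfelder zahlenimport → Spec_unterteileninfelder zahlenimport (unterteileninfelder zahlenimport)

-- ===== LEMMAS AND PROOFS =====

-- Concatenating filters of two disjoint predicates is a permutation of the filter of their disjunction.
theorem pv_perm_filter_or {α : Type} (p q : α → Bool) (h : ∀ z, ¬(p z = true ∧ q z = true)) :
    ∀ xs : List α, (xs.filter p ++ xs.filter q).Perm (xs.filter (fun z => p z || q z))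
  | [] => by simp
  | a :: t => by
    by_cases hp : p a = true
    · have hq : q a = false := by
        cases hqa : q a with
        | true => exact absurd ⟨hp, hqa⟩ (h a)
        | false => rfl
      simpa [List.filter_cons, hp, hq] using (pv_perm_filter_or p q h t).cons a
    · cases hq : q a with
      | true =>
        have h1 : (t.filter p ++ a :: t.filter q).Perm (a :: (t.filter p ++ t.filter q)) :=
          List.perm_middle
        simpa [List.filter_cons, hp, hq] using h1.trans ((pv_perm_filter_or p q h t).cons a)
      | false => simpa [List.filter_cons, hp, hq] using pv_perm_filter_or p q h t

-- Grouping by membership of a duplicate-free list R is a permutation of filtering by R-membership.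
theorem pv_perm_flatMap_filter (xs : List Int) :
    ∀ R : List Int, R.Nodup →
      (R.flatMap (fun v => xs.filter (fun z => decide (z = v)))).Perm
        (xs.filter (fun z => decide (z ∈ R)))
  | [], _ => by simp
  | v :: R', hnd => by
    have hv : v ∉ R' := (List.nodup_cons.mp hnd).1
    have ih := pv_perm_flatMap_filter xs R' (List.nodup_cons.mp hnd).2
    have hdisj : ∀ z : Int, ¬((decide (z = v)) = true ∧ (decide (z ∈ R')) = true) := by
      intro z hz
      have h1 : z = v := by simpa using hz.1
      have h2 : z ∈ R' := by simpa using hz.2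
      exact hv (h1 ▸ h2)
    have hperm :
        (xs.filter (fun z => decide (z = v)) ++ xs.filter (fun z => decide (z ∈ R'))).Perm
          (xs.filter (fun z => decide (z = v) || decide (z ∈ R'))) :=
      pv_perm_filter_or _ _ hdisj xs
    have hcongr :
        (xs.filter (fun z => decide (z = v) || decide (z ∈ R'))) =
          (xs.filter (fun z => decide (z ∈ v :: R'))) := by
      apply List.filter_congr
      intro z _
      simp [List.mem_cons]
    have e1 : ((v :: R').flatMap (fun v => xs.filter (fun z => decide (z = v))))
        = xs.filter (fun z => decide (z = v)) ++
            R'.flatMap (fun v => xs.filter (fun z => decide (z = v))) := by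
      simp [List.flatMap_cons]
    rw [e1, ← hcongr]
    exact (ih.append_left _).trans hperm

-- One field of A equals one field of B: value-by-value grouping over the range
-- [lo, hi) is the stable sort of the range filter.
theorem pv_field_eq (xs : List Int) (lo hi : Int) :
    (PySem.List.pyRange lo hi 1).foldl
      (fun puffer zahlenindex =>
        xs.foldl (fun p zahl => if zahl = zahlenindex then p ++ [zahl] else p) puffer) []
    = PySem.List.sorted (xs.filter (fun z => decide (lo ≤ z ∧ z < hi))) (fun x => x) false := by
  have hstep :
      (PySem.List.pyRange lo hi 1).foldl
        (fun puffer zahlenindex =>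
          xs.foldl (fun p zahl => if zahl = zahlenindex then p ++ [zahl] else p) puffer) []
      = (PySem.List.pyRange lo hi 1).flatMap (fun v => xs.filter (fun z => decide (z = v))) := by
    have hfun : (fun (puffer : List Int) (zahlenindex : Int) =>
          xs.foldl (fun p zahl => if zahl = zahlenindex then p ++ [zahl] else p) puffer)
        = (fun puffer v => puffer ++ xs.filter (fun z => decide (z = v))) := by
      funext puffer v
      exact PySem.List.foldl_append_ite_eq_filter (fun z => z = v) xs puffer
    rw [hfun, PySem.List.foldl_append_eq_flatMap]
    simp
  rw [hstep]
  symm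
  apply PySem.List.sorted_id_eq_of_perm_of_pairwise
  · -- permutation
    have hperm := pv_perm_flatMap_filter xs (PySem.List.pyRange lo hi 1)
      (PySem.List.nodup_pyRange_one lo hi)
    have hcongr :
        (xs.filter (fun z => decide (z ∈ PySem.List.pyRange lo hi 1))) =
          (xs.filter (fun z => decide (lo ≤ z ∧ z < hi))) := by
      apply List.filter_congr
      intro z _
      simp [PySem.List.mem_pyRange_one]
    exact hcongr ▸ hperm
  · -- sortedness of the grouped list
    have hdef :
        (PySem.List.pyRange lo hi 1).flatMap (fun v => xs.filter (fun z => decide (z = v)))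
        = ((PySem.List.pyRange lo hi 1).map (fun v => xs.filter (fun z => decide (z = v)))).flatten := by
      simp [List.flatMap_def]
    rw [hdef]
    apply List.pairwise_flatten.mpr
    constructor
    · intro l hl
      rcases List.mem_map.mp hl with ⟨v, _, rfl⟩
      apply List.pairwise_of_forall_mem_list
      intro a ha b hb
      have ha' : a = v := by simpa using (List.mem_filter.mp ha).2
      have hb' : b = v := by simpa using (List.mem_filter.mp hb).2
      omega
    · apply List.pairwise_map.mpr
      refine (PySem.List.pairwise_lt_pyRange_one lo hi).imp ?_
      intro v w hvw x hx y hy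
      have hx' : x = v := by simpa using (List.mem_filter.mp hx).2
      have hy' : y = w := by simpa using (List.mem_filter.mp hy).2
      omega

-- ===== VERDICT (by name: the statement is the Claim_ definition above) =====
theorem unterteileninfelder_spec : Claim_equal_unterteileninfelder := by
  intro xs _ _
  unfold Spec_unterteileninfelder unterteileninfelder unterteileninfelder_alt
  simp only [PySem.List.foldl_append_singleton_eq_map, List.nil_append]
  apply List.map_congr_left
  intro i _
  have hrw : PySem.Int.floordiv (i * ((PySem.List.pyGet? xs (-1)).getD 0)) 10 +
        PySem.Int.floordiv ((PySem.List.pyGet? xs (-1)).getD 0) 10 + 2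
      = PySem.Int.floordiv (i * ((PySem.List.pyGet? xs (-1)).getD 0)) 10 +
        (PySem.Int.floordiv ((PySem.List.pyGet? xs (-1)).getD 0) 10 + 2) := by ring
  rw [hrw]
  exact pv_field_eq xs _ _
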